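-- pv_equiv track=rewrite | github.com/yfussy/Grader | Python/Part-II/Part-II-Odd-Odd-Functions.py | zip_odds
-- ===== SOURCE A (Python) =====
-- def is_odd(n):
--     return True if n % 2 != 0 else False
--
-- def get_odds(x):
--     odds = []
--     for num in x:
--         if is_odd(num):
--             odds.append(num)
--     return odds
--
-- def zip_odds(a, b):
--     zipOdd = []
--     oddA = get_odds(a)
--     oddB = get_odds(b)
--     minLen = min(len(oddA), len(oddB))
--     for i in range(minLen):
--         zipOdd.append(oddA[i])
--         zipOdd.append(oddB[i])
--     return zipOdd + (oddA[minLen:] if minLen == len(oddB) else oddB[minLen:])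
-- ===== SOURCE B (Python) =====
-- def zip_odds(a, b):
--     xs = [n for n in a if n % 2 != 0]
--     ys = [n for n in b if n % 2 != 0]
--     out = []
--     i = j = 0
--     while i < len(xs):
--         out.append(xs[i])
--         xs, ys = ys, xs
--         i, j = j, i + 1
--     return out + ys[j:]
-- ===== Notes on version B (the rewrite author's own statement) =====
-- stated objective: alternative
-- what changed: Replaces A's min-length index loop plus conditional leftover-slice with a single alternating loop that swaps the two filtered lists (and two indices) each step, so no min(), no per-pair double append and no branch on which list is longer.
import Mathlib
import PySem

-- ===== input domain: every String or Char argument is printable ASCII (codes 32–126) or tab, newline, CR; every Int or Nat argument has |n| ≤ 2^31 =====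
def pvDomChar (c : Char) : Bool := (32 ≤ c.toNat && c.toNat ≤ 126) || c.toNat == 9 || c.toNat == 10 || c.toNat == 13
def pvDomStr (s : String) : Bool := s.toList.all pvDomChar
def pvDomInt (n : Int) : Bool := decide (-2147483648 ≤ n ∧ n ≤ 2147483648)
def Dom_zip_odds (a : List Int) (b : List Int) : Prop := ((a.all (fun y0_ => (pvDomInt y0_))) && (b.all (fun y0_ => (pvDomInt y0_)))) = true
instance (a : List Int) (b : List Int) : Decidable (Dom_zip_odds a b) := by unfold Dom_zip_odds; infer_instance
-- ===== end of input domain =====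

-- B replaces A's min/index loop and conditional leftover slice by an alternating two-list swap loop (alternative decomposition, same cost).

-- ===== PORT A =====
def is_odd (n : Int) : Bool := if PySem.Int.mod n 2 ≠ 0 then true else false

def get_odds (x : List Int) : List Int :=
  x.foldl (fun odds num => if is_odd num then odds ++ [num] else odds) []

def zip_odds (a : List Int) (b : List Int) : List Int :=
  let oddA := get_odds a
  let oddB := get_odds b
  let minLen : Int := min (oddA.length : Int) (oddB.length : Int)
  let zipOdd := (PySem.List.pyRange 0 minLen 1).foldl
    (fun z i => (z ++ [PySem.List.pyGetD oddA i 0]) ++ [PySem.List.pyGetD oddB i 0]) []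
  zipOdd ++ (if minLen = (oddB.length : Int) then PySem.List.slice oddA (some minLen) none
             else PySem.List.slice oddB (some minLen) none)

-- ===== PORT B =====
-- the while loop: append xs[i], then swap (xs,ys) and (i,j := j,i+1); indices stay ≥ 0, transcribed as Nat
def zipLoopB (xs ys : List Int) (i j : Nat) (out : List Int) : List Int :=
  if i < xs.length then
    zipLoopB ys xs j (i + 1) (out ++ [xs.getD i 0])
  else
    out ++ ys.drop j
termination_by (xs.length - i) + (ys.length - j)
decreasing_by omega

def zip_odds_alt (a : List Int) (b : List Int) : List Int :=
  let xs := a.filter (fun n => PySem.Int.mod n 2 ≠ 0)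
  let ys := b.filter (fun n => PySem.Int.mod n 2 ≠ 0)
  zipLoopB xs ys 0 0 []

-- ===== PRECONDITION & SPEC =====
def Spec_zip_odds (a : List Int) (b : List Int) (out : List Int) : Prop := out = zip_odds_alt a b
instance (a : List Int) (b : List Int) (out : List Int) : Decidable (Spec_zip_odds a b out) := by unfold Spec_zip_odds; infer_instance

-- ===== CLAIM (what is proved, stated in full; the proofs are below) =====
def Claim_equal_zip_odds : Prop := ∀ (a : List Int) (b : List Int), Dom_zip_odds a b → Spec_zip_odds a b (zip_odds a b)

-- ===== LEMMAS AND PROOFS =====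

/-- Reference interleaving both ports are reduced to. -/
def itl : List Int → List Int → List Int
  | [], v => v
  | x :: u, v => x :: itl v u
termination_by u v => u.length + v.length
decreasing_by simp; omega

theorem zipLoopB_eq (xs ys : List Int) (i j : Nat) (out : List Int) :
    zipLoopB xs ys i j out = out ++ itl (xs.drop i) (ys.drop j) := by
  fun_induction zipLoopB with
  | case1 xs ys i j out h ih =>
    have hx : xs.drop i = xs.getD i 0 :: xs.drop (i + 1) := by
      rw [List.getD_eq_getElem _ _ h, List.drop_eq_getElem_cons h]
    rw [ih, hx, itl]
    simp
  | case2 xs ys i j out h =>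
    have : xs.drop i = [] := by simp; omega
    rw [this, itl]

theorem get_odds_eq_filter (x : List Int) :
    get_odds x = x.filter (fun n => PySem.Int.mod n 2 ≠ 0) := by
  unfold get_odds is_odd
  rw [PySem.List.foldl_append_if_eq_filter]
  simp

theorem itl_take_succ (m : Nat) : ∀ (u v : List Int), (hu : m < u.length) → (hv : m < v.length) →
    itl (u.take (m + 1)) (v.take (m + 1)) = itl (u.take m) (v.take m) ++ [u[m], v[m]] := by
  induction m with
  | zero =>
    intro u v hu hv
    match u, v with
    | x :: u, y :: v => simp [itl]
  | succ m ih =>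
    intro u v hu hv
    match u, v with
    | x :: u, y :: v =>
      simp only [List.take_succ_cons, itl]
      rw [ih u v (by simpa using hu) (by simpa using hv)]
      simp

theorem loopA_eq (u v : List Int) (m : Nat) (hu : m ≤ u.length) (hv : m ≤ v.length) (z : List Int) :
    (PySem.List.pyRange 0 (m : Int) 1).foldl
      (fun z i => (z ++ [PySem.List.pyGetD u i 0]) ++ [PySem.List.pyGetD v i 0]) z
    = z ++ itl (u.take m) (v.take m) := by
  induction m generalizing z with
  | zero => simp [itl]
  | succ m ih =>
    have : ((m + 1 : Nat) : Int) = (m : Int) + 1 := by push_cast; ring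
    rw [this, PySem.List.pyRange_one_succ_right (by positivity), List.foldl_append,
        ih (by omega) (by omega)]
    simp only [List.foldl_cons, List.foldl_nil, PySem.List.pyGetD_natCast]
    rw [List.getD_eq_getElem _ _ (by omega), List.getD_eq_getElem _ _ (by omega)]
    rw [itl_take_succ m u v (by omega) (by omega)]
    simp

theorem itl_split : ∀ (u v : List Int),
    itl u v = itl (u.take (min u.length v.length)) (v.take (min u.length v.length))
      ++ (if (min u.length v.length : Nat) = v.length then u.drop (min u.length v.length)
          else v.drop (min u.length v.length))
  | [], v => by
    cases v with
    | nil => simp [itl]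
    | cons y w => simp [itl]
  | x :: u, v => by
    cases v with
    | nil => simp [itl]
    | cons y w =>
      have ih := itl_split u w
      simp only [List.length_cons, itl]
      have hmin : min (u.length + 1) (w.length + 1) = min u.length w.length + 1 := by omega
      rw [hmin]
      simp only [List.take_succ_cons, List.drop_succ_cons, itl]
      rw [ih]
      by_cases h : min u.length w.length = w.length
      · simp [h]
      · simp [h]
termination_by u v => u.length + v.length
decreasing_by simp; omega

-- ===== VERDICT (by name: the statement is the Claim_ definition above) =====
theorem zip_odds_spec : Claim_equal_zip_odds := by
  intro a b _
  unfold Spec_zip_odds zip_odds zip_odds_alt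
  rw [zipLoopB_eq, get_odds_eq_filter a, get_odds_eq_filter b]
  simp only [List.drop_zero, List.nil_append]
  set u := a.filter (fun n => PySem.Int.mod n 2 ≠ 0) with hu
  set v := b.filter (fun n => PySem.Int.mod n 2 ≠ 0) with hv
  have hmin : (min (u.length : Int) (v.length : Int)) = ((min u.length v.length : Nat) : Int) := by
    push_cast; ring
  rw [hmin]
  rw [loopA_eq u v (min u.length v.length) (by omega) (by omega) []]
  rw [PySem.List.slice_from_natCast]
  rw [PySem.List.slice_from_natCast]
  rw [itl_split u v]
  simp only [List.nil_append]
  have hif : (if ((min u.length v.length : Nat) : Int) = ((v.length : Nat) : Int)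
        then u.drop (min u.length v.length) else v.drop (min u.length v.length))
      = (if min u.length v.length = v.length
        then u.drop (min u.length v.length) else v.drop (min u.length v.length)) := by
    by_cases h : min u.length v.length = v.length
    · simp [h]
    · have h2 : ¬ (((min u.length v.length : Nat) : Int) = ((v.length : Nat) : Int)) := by
        exact_mod_cast h
      rw [if_neg h2, if_neg h]
  rw [hif]
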